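-- pv_equiv track=rewrite | github.com/yellowisk/mc102-projs | BeeCrowd/python/may/diet_plan.py | isFollowingDiet
-- ===== SOURCE A (Python) =====
-- def findLetter(letter: str, letters: list) -> int:
--     e = 0
--     d = len(letters)
--     while e <= d:
--         m = int((e + d)/2)
--         if m >= len(letters):
--             return -1
--         if letters[m] == letter:
--             return m
--         elif letters[m] < letter:
--            e = m + 1
--         elif letters[m] > letter:
--             d = m - 1
--     return -1
--
-- def orderLetters(letters: list) -> list:
--     for i in range(len(letters)):
--         for j in range(i+1,len(letters)):
--             if letters[i] > letters[j]:
--                 letters[i],letters[j] = letters[j],letters[i]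
--     return letters
--
-- def isFollowingDiet(diet: str, meals: list) -> bool:
--     dietList = orderLetters(list(diet))
--
--     for meal in meals:
--         for i in range(len(meal)):
--             result = findLetter(meal[i],dietList)
--             if result == -1:
--                 return 'CHEATER'
--             else:
--                 del dietList[result]
--     return ''.join(map(str,orderLetters(dietList)))
-- ===== SOURCE B (Python) =====
-- def isFollowingDiet(diet: str, meals: list) -> bool:
--     counts = {}
--     for c in diet:
--         counts[c] = counts.get(c, 0) + 1
--     for meal in meals:
--         for c in meal:
--             n = counts.get(c, 0)
--             if n == 0:
--                 return 'CHEATER'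
--             counts[c] = n - 1
--     return ''.join(c * counts[c] for c in sorted(counts))
-- ===== Notes on version B (the rewrite author's own statement) =====
-- stated objective: faster
-- what changed: Replaces A's quadratic bubble-sort of the diet plus per-meal-character binary-search-and-delete on a mutating list by a single counting dict built once, O(1) decrement per meal character, and one final sort over the distinct leftover characters.
import Mathlib
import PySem

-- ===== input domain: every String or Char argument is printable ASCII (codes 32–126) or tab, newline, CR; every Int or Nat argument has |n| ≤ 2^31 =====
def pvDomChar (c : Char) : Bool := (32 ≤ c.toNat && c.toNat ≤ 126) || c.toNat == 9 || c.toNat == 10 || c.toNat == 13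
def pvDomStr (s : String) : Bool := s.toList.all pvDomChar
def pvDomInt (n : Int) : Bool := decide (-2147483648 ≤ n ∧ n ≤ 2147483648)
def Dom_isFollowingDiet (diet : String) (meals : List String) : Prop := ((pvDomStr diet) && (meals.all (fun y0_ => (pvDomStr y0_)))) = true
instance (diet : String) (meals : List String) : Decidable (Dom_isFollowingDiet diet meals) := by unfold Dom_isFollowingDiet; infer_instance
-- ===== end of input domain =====

-- B replaces A's bubble sort + binary-search-and-delete by a counting dict with O(1) decrements
-- and one final sort of the distinct leftover characters (measurably faster, asymptotic change).


-- ===== PORT A =====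
-- Python's `int((e+d)/2)` is truncating division; on every reachable call e ≥ 0 and e ≤ d,
-- so e + d ≥ 0 and PySem.Int.floordiv is exact there.
def findLetterGo (letter : Char) (letters : List Char) (e d : Int) : Int :=
  if _hle : e ≤ d then
    let m := PySem.Int.floordiv (e + d) 2
    if (letters.length : Int) ≤ m then -1
    else if letters.getD m.toNat ' ' = letter then m
    else if letters.getD m.toNat ' ' < letter then findLetterGo letter letters (m + 1) d
    else findLetterGo letter letters e (m - 1)
  else -1
termination_by (d + 1 - e).toNat
decreasing_by
  · have h := PySem.Int.floordiv_two_mid_bounds _hle; omega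
  · have h := PySem.Int.floordiv_two_mid_bounds _hle; omega

def findLetter (letter : Char) (letters : List Char) : Int :=
  findLetterGo letter letters 0 letters.length

-- A's index-based swap loops, rendered as structural recursion over the same state: one inner
-- pass compares the current cell with each later cell and swaps, one outer pass per position.
def selPass : Char → List Char → Char × List Char
  | h, [] => (h, [])
  | h, x :: xs =>
      if x < h then let p := selPass x xs; (p.1, h :: p.2)
      else let p := selPass h xs; (p.1, x :: p.2)

theorem selPass_length (h : Char) (t : List Char) : (selPass h t).2.length = t.length := by
  induction t generalizing h with
  | nil => rfl
  | cons x xs ih => simp only [selPass]; split <;> simp [ih]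

def orderLetters (letters : List Char) : List Char :=
  match letters with
  | [] => []
  | h :: t => (selPass h t).1 :: orderLetters (selPass h t).2
termination_by letters.length
decreasing_by simp [selPass_length]

def eatMeal : List Char → List Char → Option (List Char)
  | dl, [] => some dl
  | dl, c :: rest =>
      let r := findLetter c dl
      if r = -1 then none else eatMeal (dl.eraseIdx r.toNat) rest

def eatAll : List Char → List String → Option (List Char)
  | dl, [] => some dl
  | dl, meal :: ms =>
      match eatMeal dl meal.toList with
      | none => none
      | some dl' => eatAll dl' ms

def isFollowingDiet (diet : String) (meals : List String) : String :=
  match eatAll (orderLetters diet.toList) meals with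
  | none => "CHEATER"
  | some dl => String.ofList (orderLetters dl)

-- ===== PORT B =====
def countDiet (diet : List Char) : PySem.Dict Char Int :=
  diet.foldl (fun d c => d.insert c (d.getD c 0 + 1)) PySem.Dict.empty

def consumeMeal : PySem.Dict Char Int → List Char → Option (PySem.Dict Char Int)
  | d, [] => some d
  | d, c :: rest =>
      let n := d.getD c 0
      if n = 0 then none else consumeMeal (d.insert c (n - 1)) rest

def consumeAll : PySem.Dict Char Int → List String → Option (PySem.Dict Char Int)
  | d, [] => some d
  | d, m :: ms =>
      match consumeMeal d m.toList with
      | none => none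
      | some d' => consumeAll d' ms

def isFollowingDiet_alt (diet : String) (meals : List String) : String :=
  match consumeAll (countDiet diet.toList) meals with
  | none => "CHEATER"
  | some d =>
      String.ofList ((PySem.List.sorted d.keys (fun x => x) false).flatMap
        (fun c => List.replicate (d.getD c 0).toNat c))

-- ===== PRECONDITION & SPEC =====
def Spec_isFollowingDiet (diet : String) (meals : List String) (out : String) : Prop := out = isFollowingDiet_alt diet meals
instance (diet : String) (meals : List String) (out : String) : Decidable (Spec_isFollowingDiet diet meals out) := by unfold Spec_isFollowingDiet; infer_instance

-- ===== CLAIM (what is proved, stated in full; the proofs are below) =====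
def Claim_equal_isFollowingDiet : Prop := ∀ (diet : String) (meals : List String), Dom_isFollowingDiet diet meals → Spec_isFollowingDiet diet meals (isFollowingDiet diet meals)


-- ===== LEMMAS AND PROOFS =====

-- the simulation invariant between A's sorted leftover list and B's count dict
def DietInv (d : PySem.Dict Char Int) (dl : List Char) : Prop :=
  dl.Pairwise (· ≤ ·) ∧ d.keys.Nodup ∧ (∀ c : Char, (dl.count c : Int) = d.getD c 0)

theorem getD_mono_of_sorted (l : List Char) (hs : l.Pairwise (· ≤ ·)) {i j : Nat}
    (hij : i ≤ j) (hj : j < l.length) : l.getD i ' ' ≤ l.getD j ' ' := by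
  rcases Nat.eq_or_lt_of_le hij with h | h
  · rw [h]
  · rw [List.getD_eq_getElem l ' ' (lt_trans h hj), List.getD_eq_getElem l ' ' hj]
    exact (List.pairwise_iff_getElem.mp hs) i j (lt_trans h hj) hj h

theorem findLetterGo_spec (c : Char) (l : List Char) (hs : l.Pairwise (· ≤ ·)) (e d : Int) :
    0 ≤ e → d ≤ l.length →
    (∀ k : Nat, k < l.length → (k : Int) < e → l.getD k ' ' < c) →
    (∀ k : Nat, k < l.length → d < (k : Int) → c < l.getD k ' ') →
    (findLetterGo c l e d = -1 ∧ c ∉ l) ∨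
    (∃ r : Nat, findLetterGo c l e d = (r : Int) ∧ r < l.length ∧ l.getD r ' ' = c) := by
  fun_induction findLetterGo c l e d with
  | case1 e d hle m hm =>
    intro he hd hlo hhi
    have hmeq : m = (e + d) / 2 := PySem.Int.floordiv_eq_ediv_of_pos (by norm_num)
    have hb : e ≤ (e + d) / 2 ∧ (e + d) / 2 ≤ d := by
      have h := PySem.Int.floordiv_two_mid_bounds hle
      rwa [PySem.Int.floordiv_eq_ediv_of_pos (by norm_num)] at h
    rw [hmeq] at hm
    left
    refine ⟨rfl, fun hmem => ?_⟩
    obtain ⟨k, hk, hkc⟩ := List.mem_iff_getElem.mp hmem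
    have := hlo k hk (by omega)
    rw [List.getD_eq_getElem l ' ' hk, hkc] at this
    exact lt_irrefl c this
  | case2 e d hle m hm heq =>
    intro he hd hlo hhi
    have hmeq : m = (e + d) / 2 := PySem.Int.floordiv_eq_ediv_of_pos (by norm_num)
    have hb : e ≤ (e + d) / 2 ∧ (e + d) / 2 ≤ d := by
      have h := PySem.Int.floordiv_two_mid_bounds hle
      rwa [PySem.Int.floordiv_eq_ediv_of_pos (by norm_num)] at h
    rw [hmeq] at hm heq ⊢
    right
    exact ⟨((e + d) / 2).toNat, by omega, by omega, heq⟩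
  | case3 e d hle m hm heq hlt ih =>
    intro he hd hlo hhi
    have hmeq : m = (e + d) / 2 := PySem.Int.floordiv_eq_ediv_of_pos (by norm_num)
    have hb : e ≤ (e + d) / 2 ∧ (e + d) / 2 ≤ d := by
      have h := PySem.Int.floordiv_two_mid_bounds hle
      rwa [PySem.Int.floordiv_eq_ediv_of_pos (by norm_num)] at h
    rw [hmeq] at hm heq hlt ih ⊢
    refine ih (by omega) hd (fun k hk hkm => ?_) hhi
    rcases Nat.lt_or_ge k ((e + d) / 2).toNat with h | h
    · exact lt_of_le_of_lt (getD_mono_of_sorted l hs (Nat.le_of_lt h) (by omega)) hlt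
    · have : k = ((e + d) / 2).toNat := by omega
      rw [this]; exact hlt
  | case4 e d hle m hm heq hlt ih =>
    intro he hd hlo hhi
    have hmeq : m = (e + d) / 2 := PySem.Int.floordiv_eq_ediv_of_pos (by norm_num)
    have hb : e ≤ (e + d) / 2 ∧ (e + d) / 2 ≤ d := by
      have h := PySem.Int.floordiv_two_mid_bounds hle
      rwa [PySem.Int.floordiv_eq_ediv_of_pos (by norm_num)] at h
    rw [hmeq] at hm heq hlt ih ⊢
    have hcm : c < l.getD ((e + d) / 2).toNat ' ' := lt_of_le_of_ne (not_lt.mp hlt) (Ne.symm heq)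
    refine ih he (by omega) hlo (fun k hk hkm => ?_)
    rcases Nat.lt_or_ge ((e + d) / 2).toNat k with h | h
    · exact lt_of_lt_of_le hcm (getD_mono_of_sorted l hs (Nat.le_of_lt h) hk)
    · have : k = ((e + d) / 2).toNat := by omega
      rw [this]; exact hcm
  | case5 e d hle =>
    intro he hd hlo hhi
    left
    refine ⟨rfl, fun hmem => ?_⟩
    obtain ⟨k, hk, hkc⟩ := List.mem_iff_getElem.mp hmem
    rcases Int.lt_or_le (k : Int) e with h | h
    · have := hlo k hk h
      rw [List.getD_eq_getElem l ' ' hk, hkc] at this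
      exact lt_irrefl c this
    · have := hhi k hk (by omega)
      rw [List.getD_eq_getElem l ' ' hk, hkc] at this
      exact lt_irrefl c this

theorem findLetter_spec (c : Char) (l : List Char) (hs : l.Pairwise (· ≤ ·)) :
    (findLetter c l = -1 ∧ c ∉ l) ∨
    (∃ r : Nat, findLetter c l = (r : Int) ∧ r < l.length ∧ l.getD r ' ' = c) := by
  exact findLetterGo_spec c l hs 0 l.length (le_refl 0) (le_refl _)
    (fun k hk hke => by omega) (fun k hk hkd => by omega)

theorem selPass_spec (h : Char) (t : List Char) :
    ((selPass h t).1 :: (selPass h t).2).Perm (h :: t) ∧ (∀ y ∈ h :: t, (selPass h t).1 ≤ y) := by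
  induction t generalizing h with
  | nil => simp [selPass]
  | cons x xs ih =>
    simp only [selPass]
    split
    next hxh =>
      obtain ⟨hp, hmin⟩ := ih x
      refine ⟨(List.Perm.swap h (selPass x xs).1 (selPass x xs).2).trans (hp.cons h), ?_⟩
      intro y hy
      rcases List.mem_cons.mp hy with rfl | hy'
      · exact le_of_lt (lt_of_le_of_lt (hmin x (List.mem_cons_self)) hxh)
      · exact hmin y hy'
    next hxh =>
      obtain ⟨hp, hmin⟩ := ih h
      refine ⟨((List.Perm.swap x (selPass h xs).1 (selPass h xs).2).trans (hp.cons x)).trans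
        (List.Perm.swap h x xs), ?_⟩
      intro y hy
      rcases List.mem_cons.mp hy with rfl | hy'
      · exact hmin y (List.mem_cons_self)
      · rcases List.mem_cons.mp hy' with rfl | hy''
        · exact le_trans (hmin h (List.mem_cons_self)) (not_lt.mp hxh)
        · exact hmin y (List.mem_cons_of_mem _ hy'')

theorem orderLetters_perm (l : List Char) : (orderLetters l).Perm l := by
  fun_induction orderLetters l with
  | case1 => exact List.Perm.refl _
  | case2 h t ih => exact (ih.cons _).trans (selPass_spec h t).1

theorem orderLetters_sorted (l : List Char) : (orderLetters l).Pairwise (· ≤ ·) := by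
  fun_induction orderLetters l with
  | case1 => exact List.Pairwise.nil
  | case2 h t ih =>
    refine List.pairwise_cons.mpr ⟨?_, ih⟩
    intro y hy
    have hy' : y ∈ (selPass h t).1 :: (selPass h t).2 :=
      List.mem_cons_of_mem _ ((orderLetters_perm _).mem_iff.mp hy)
    exact (selPass_spec h t).2 y ((selPass_spec h t).1.mem_iff.mp hy')

theorem count_eraseIdx_of_getD (l : List Char) (i : Nat) (hi : i < l.length) (c : Char)
    (hc : l.getD i ' ' = c) (x : Char) :
    (l.eraseIdx i).count x = l.count x - (if x = c then 1 else 0) := by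
  rw [List.getD_eq_getElem l ' ' hi] at hc
  have hsplit : l.count x
      = (l.take i).count x + ((l.drop (i + 1)).count x + (if x = c then 1 else 0)) := by
    conv_lhs => rw [← List.take_append_drop i l, List.drop_eq_getElem_cons hi]
    simp only [List.count_append, List.count_cons, hc, beq_iff_eq, @eq_comm _ c x]
  rw [List.eraseIdx_eq_take_drop_succ, List.count_append, hsplit]
  split_ifs <;> omega

theorem eat_consume_meal (m : List Char) (d : PySem.Dict Char Int) (dl : List Char)
    (hinv : DietInv d dl) :
    (eatMeal dl m = none ∧ consumeMeal d m = none) ∨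
    (∃ dl' d', eatMeal dl m = some dl' ∧ consumeMeal d m = some d' ∧ DietInv d' dl') := by
  induction m generalizing d dl with
  | nil => exact Or.inr ⟨dl, d, rfl, rfl, hinv⟩
  | cons c rest ih =>
    obtain ⟨hsort, hnod, hcnt⟩ := hinv
    rcases findLetter_spec c dl hsort with ⟨hfl, hnm⟩ | ⟨r, hfl, hrlen, hrc⟩
    · have hzero : d.getD c 0 = 0 := by
        have := hcnt c
        rw [List.count_eq_zero.mpr hnm] at this
        omega
      exact Or.inl ⟨by simp [eatMeal, hfl], by simp [consumeMeal, hzero]⟩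
    · have hmem : c ∈ dl := by
        rw [List.getD_eq_getElem dl ' ' hrlen] at hrc
        exact hrc ▸ List.getElem_mem hrlen
      have hpos : 0 < dl.count c := List.count_pos_iff.mpr hmem
      have hnz : ¬ d.getD c 0 = 0 := by have := hcnt c; omega
      have hne : ¬ (r : Int) = -1 := by omega
      have hinv' : DietInv (d.insert c (d.getD c 0 - 1)) (dl.eraseIdx r) := by
        refine ⟨hsort.sublist (List.eraseIdx_sublist ..), PySem.Dict.nodup_keys_insert _ _ _ hnod, ?_⟩
        intro x
        rw [count_eraseIdx_of_getD dl r hrlen c hrc x, PySem.Dict.getD_insert]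
        have h1 := hcnt x
        have h2 := hcnt c
        split_ifs with hx
        · subst hx; omega
        · omega
      rcases ih _ _ hinv' with ⟨h1, h2⟩ | ⟨dl', d', h1, h2, hi⟩
      · exact Or.inl ⟨by simp [eatMeal, hfl, hne, h1], by simp [consumeMeal, hnz, h2]⟩
      · exact Or.inr ⟨dl', d', by simp [eatMeal, hfl, hne, h1], by simp [consumeMeal, hnz, h2], hi⟩

theorem eat_consume_all (ms : List String) (d : PySem.Dict Char Int) (dl : List Char)
    (hinv : DietInv d dl) :
    (eatAll dl ms = none ∧ consumeAll d ms = none) ∨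
    (∃ dl' d', eatAll dl ms = some dl' ∧ consumeAll d ms = some d' ∧ DietInv d' dl') := by
  induction ms generalizing d dl with
  | nil => exact Or.inr ⟨dl, d, rfl, rfl, hinv⟩
  | cons m ms ih =>
    rcases eat_consume_meal m.toList d dl hinv with ⟨h1, h2⟩ | ⟨dl', d', h1, h2, hi⟩
    · exact Or.inl ⟨by simp [eatAll, h1], by simp [consumeAll, h2]⟩
    · rcases ih d' dl' hi with ⟨g1, g2⟩ | ⟨dl2, d2, g1, g2, hi2⟩
      · exact Or.inl ⟨by simp [eatAll, h1, g1], by simp [consumeAll, h2, g2]⟩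
      · exact Or.inr ⟨dl2, d2, by simp [eatAll, h1, g1], by simp [consumeAll, h2, g2], hi2⟩

theorem count_flatMap_rep (ks : List Char) (g : Char → Int) (hks : ks.Pairwise (· < ·)) (x : Char) :
    (ks.flatMap (fun c => List.replicate (g c).toNat c)).count x =
      if x ∈ ks then (g x).toNat else 0 := by
  induction ks with
  | nil => simp
  | cons k ks' ih =>
    have hk : k ∉ ks' := fun hm => lt_irrefl k ((List.pairwise_cons.mp hks).1 k hm)
    simp only [List.flatMap_cons, List.count_append, ih (List.pairwise_cons.mp hks).2,
      List.count_replicate, List.mem_cons]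
    by_cases hx : x = k
    · subst hx; simp [hk]
    · simp [hx, Ne.symm hx]

theorem sorted_flatMap_rep (ks : List Char) (g : Char → Int) (hks : ks.Pairwise (· < ·)) :
    (ks.flatMap (fun c => List.replicate (g c).toNat c)).Pairwise (· ≤ ·) := by
  induction ks with
  | nil => simp
  | cons k ks' ih =>
    simp only [List.flatMap_cons]
    refine List.pairwise_append.mpr ⟨List.pairwise_replicate_of_refl .., ih (List.pairwise_cons.mp hks).2, ?_⟩
    intro a ha b hb
    obtain rfl := (List.eq_of_mem_replicate ha)
    obtain ⟨c', hc', hb'⟩ := List.mem_flatMap.mp hb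
    rw [List.eq_of_mem_replicate hb']
    exact le_of_lt ((List.pairwise_cons.mp hks).1 c' hc')

theorem flat_eq (dl ks : List Char) (g : Char → Int)
    (hdl : dl.Pairwise (· ≤ ·)) (hks : ks.Pairwise (· < ·))
    (hcount : ∀ c ∈ ks, (dl.count c : Int) = g c)
    (h0 : ∀ c, c ∉ ks → dl.count c = 0) :
    dl = ks.flatMap (fun c => List.replicate (g c).toNat c) := by
  have hperm : dl.Perm (ks.flatMap (fun c => List.replicate (g c).toNat c)) := by
    refine List.perm_iff_count.mpr (fun x => ?_)
    rw [count_flatMap_rep ks g hks x]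
    by_cases hx : x ∈ ks
    · simp only [hx, if_true]
      have := hcount x hx
      omega
    · simp [hx, h0 x hx]
  exact PySem.List.eq_of_perm_of_pairwise_le hperm hdl (sorted_flatMap_rep ks g hks)

-- ===== VERDICT (by name: the statement is the Claim_ definition above) =====
theorem isFollowingDiet_spec : Claim_equal_isFollowingDiet := by
  unfold Claim_equal_isFollowingDiet
  intro diet meals _
  unfold Spec_isFollowingDiet isFollowingDiet isFollowingDiet_alt
  have hcd : countDiet diet.toList = PySem.Dict.counter diet.toList :=
    PySem.Dict.foldl_insert_getD_add_one_eq_counter diet.toList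
  have hinv : DietInv (countDiet diet.toList) (orderLetters diet.toList) := by
    refine ⟨orderLetters_sorted _, ?_, ?_⟩
    · rw [hcd]; exact PySem.Dict.nodup_keys_counter diet.toList
    · intro c
      rw [hcd, PySem.Dict.getD_counter, (orderLetters_perm diet.toList).count_eq]
  rcases eat_consume_all meals _ _ hinv with ⟨h1, h2⟩ | ⟨dl', d', h1, h2, hsort', hnod', hcnt'⟩
  · simp [h1, h2]
  · simp only [h1, h2]
    have hol : orderLetters dl' = dl' :=
      PySem.List.eq_of_perm_of_pairwise_le (orderLetters_perm dl') (orderLetters_sorted dl') hsort'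
    rw [hol]
    have hn : (PySem.List.sorted d'.keys (fun x => x) false).Nodup :=
      (PySem.List.sorted_perm d'.keys (fun x => x) false).symm.nodup hnod'
    have hle : (PySem.List.sorted d'.keys (fun x => x) false).Pairwise (· ≤ ·) :=
      PySem.List.sorted_pairwise d'.keys (fun x => x)
    have hks : (PySem.List.sorted d'.keys (fun x => x) false).Pairwise (· < ·) :=
      (hle.and hn).imp (fun h => lt_of_le_of_ne h.1 h.2)
    congr 1
    refine flat_eq dl' _ _ hsort' hks (fun c _ => hcnt' c) (fun c hc => ?_)
    have hck : c ∉ d'.keys := fun hm => hc ((PySem.List.mem_sorted d'.keys (fun x => x) false c).mpr hm)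
    have hcf : d'.contains c = false :=
      eq_false_of_ne_true (fun ht => hck ((PySem.Dict.contains_iff_mem_keys d' c).mp ht))
    have hgd : d'.getD c 0 = 0 := PySem.Dict.getD_of_not_contains d' 0 hcf
    have := hcnt' c
    omega
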